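-- pv_equiv track=rewrite | github.com/FilipKalcic1/mobilityone-projekt | services/registry/search_filters.py | detect_categories
-- ===== SOURCE A (Python) =====
-- from typing import Dict, Set, List, Tuple, Any, Optional, TYPE_CHECKING
--
-- def detect_categories(query: str, category_keywords: Dict) -> Set[str]:
--     """
--     Detect which categories the query is about.
--
--     Args:
--         query: The search query
--         category_keywords: Dict mapping category names to sets of keywords
--
--     Returns:
--         Set of category names that match the query
--     """
--     if not category_keywords:
--         return set()
--
--     query_lower = query.lower()
--     query_words = set(query_lower.split())
--     matching_categories: Set[str] = set()
--
--     for cat_name, keywords in category_keywords.items():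
--         # Check for word overlap
--         if query_words & keywords:
--             matching_categories.add(cat_name)
--             continue
--
--         # Check for substring matches (for longer keywords)
--         for keyword in keywords:
--             if len(keyword) >= 4 and keyword in query_lower:
--                 matching_categories.add(cat_name)
--                 break
--
--     return matching_categories
-- ===== SOURCE B (Python) =====
-- def detect_categories(query: str, category_keywords) -> set:
--     if not category_keywords:
--         return set()
--     query_lower = query.lower()
--     # inverted index: keyword -> set of category names whose keyword set contains it
--     index = {}
--     for cat_name, keywords in category_keywords.items():
--         for kw in keywords:
--             index.setdefault(kw, set()).add(cat_name)
--     # word-overlap matches via the index, driven by the query words only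
--     word_hits = set()
--     for word in query_lower.split():
--         word_hits |= index.get(word, set())
--     # substring matches (keywords of length >= 4) unioned in, in category order
--     return {cat for cat, kws in category_keywords.items()
--             if cat in word_hits
--             or any(len(k) >= 4 and k in query_lower for k in kws)}
-- ===== Notes on version B (the rewrite author's own statement) =====
-- stated objective: alternative
-- what changed: B replaces A's per-category intersection with the query-word set by an inverted keyword-to-categories index built once and probed only for the query's words, unioned with the substring matches in a final set comprehension.
import Mathlib
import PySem

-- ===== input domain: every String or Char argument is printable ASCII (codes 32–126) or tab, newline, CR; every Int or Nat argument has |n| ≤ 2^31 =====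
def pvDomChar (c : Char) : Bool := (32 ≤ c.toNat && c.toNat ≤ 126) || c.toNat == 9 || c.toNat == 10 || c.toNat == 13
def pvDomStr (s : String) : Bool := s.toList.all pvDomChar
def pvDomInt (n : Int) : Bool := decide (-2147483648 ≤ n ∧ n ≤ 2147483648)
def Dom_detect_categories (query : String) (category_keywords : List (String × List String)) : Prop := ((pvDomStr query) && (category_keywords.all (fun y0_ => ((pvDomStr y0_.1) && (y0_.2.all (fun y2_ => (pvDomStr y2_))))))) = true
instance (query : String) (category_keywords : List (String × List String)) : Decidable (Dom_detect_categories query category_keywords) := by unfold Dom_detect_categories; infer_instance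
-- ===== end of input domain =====

-- B replaces A's per-category scan over the query-word set by an inverted keyword→categories
-- index consulted once per query word (objective: alternative decomposition; return value only —
-- both return fresh sets, no argument is mutated).

-- ===== PORT A =====
-- A's inner 'for keyword in keywords: if len(keyword) >= 4 and keyword in query_lower: … break'
def pvASubLoop (ql : String) : List String → Bool
  | [] => false
  | k :: rest =>
    if decide (4 ≤ PySem.Str.len k) && PySem.Str.isIn k ql then true else pvASubLoop ql rest

def detect_categories (query : String) (category_keywords : List (String × List String)) : List String :=
  if category_keywords = [] then []
  else
    let query_lower := PySem.Str.lower query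
    let query_words : PySem.Set String := PySem.Set.ofList (PySem.Str.split₀ query_lower)
    -- for cat_name, keywords: word overlap, else the inner keyword loop (break = List.any)
    category_keywords.foldl (fun acc p =>
      if PySem.Set.inter query_words p.2 ≠ [] then PySem.Set.add acc p.1
      else if pvASubLoop query_lower p.2 then PySem.Set.add acc p.1
      else acc) []

-- ===== PORT B =====
-- B's 'len(k) >= 4 and k in query_lower' predicate
def pvSubMatch (ql : String) (k : String) : Bool :=
  decide (4 ≤ PySem.Str.len k) && PySem.Str.isIn k ql

-- index.setdefault(kw, set()).add(cat_name), for every kw of one category's keyword set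
def pvIndexCat (d : PySem.Dict String (PySem.Set String)) (p : String × List String) :
    PySem.Dict String (PySem.Set String) :=
  p.2.foldl (fun d kw => d.modify kw PySem.Set.empty (fun s => PySem.Set.add s p.1)) d

def detect_categories_alt (query : String) (category_keywords : List (String × List String)) : List String :=
  if category_keywords = [] then []
  else
    let query_lower := PySem.Str.lower query
    let index := category_keywords.foldl pvIndexCat PySem.Dict.empty
    let word_hits := (PySem.Str.split₀ query_lower).foldl
      (fun s w => PySem.Set.union s (index.getD w PySem.Set.empty)) PySem.Set.empty
    -- final set comprehension over the categories
    category_keywords.foldl (fun acc p =>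
      if word_hits.contains p.1 || p.2.any (pvSubMatch query_lower) then PySem.Set.add acc p.1
      else acc) []

-- ===== PRECONDITION & SPEC =====
-- Pre_ excludes association lists with a repeated category name: such a list does not represent a
-- Python dict (dict building collapses duplicates), so the ports' insertion orders there are accidental.
def Pre_detect_categories (query : String) (category_keywords : List (String × List String)) : Prop :=
  (category_keywords.map Prod.fst).Nodup
instance (query : String) (category_keywords : List (String × List String)) : Decidable (Pre_detect_categories query category_keywords) := by unfold Pre_detect_categories; infer_instance

def pvWitness_detect_categories : String × (List (String × List String)) :=
  ("book cheap flights", [("travel", ["flight", "hotel"]), ("food", ["pizza"])])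

def Spec_detect_categories (query : String) (category_keywords : List (String × List String)) (out : List String) : Prop := out = detect_categories_alt query category_keywords
instance (query : String) (category_keywords : List (String × List String)) (out : List String) : Decidable (Spec_detect_categories query category_keywords out) := by unfold Spec_detect_categories; infer_instance

-- ===== CLAIM (what is proved, stated in full; the proofs are below) =====
def Claim_equal_detect_categories : Prop := ∀ (query : String) (category_keywords : List (String × List String)), Dom_detect_categories query category_keywords → Pre_detect_categories query category_keywords → Spec_detect_categories query category_keywords (detect_categories query category_keywords)

-- ===== LEMMAS AND PROOFS =====

-- membership after indexing one category's keyword list under name nm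
theorem mem_getD_addAll (nm : String) (kws : List String)
    (d : PySem.Dict String (PySem.Set String)) (w c : String) :
    c ∈ (kws.foldl (fun d kw => d.modify kw PySem.Set.empty (fun s => PySem.Set.add s nm)) d).getD w PySem.Set.empty ↔
      c ∈ d.getD w PySem.Set.empty ∨ (c = nm ∧ w ∈ kws) := by
  induction kws generalizing d with
  | nil => simp
  | cons kw rest ih =>
    simp only [List.foldl_cons, ih, List.mem_cons]
    by_cases hw : w = kw
    · subst hw
      rw [PySem.Dict.getD_modify_self]
      simp [PySem.Set.mem_add]
      tauto
    · rw [PySem.Dict.getD_modify_of_ne _ _ _ (fun h => hw h)]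
      tauto

-- membership in the full inverted index
theorem mem_getD_index_gen (cks : List (String × List String))
    (d : PySem.Dict String (PySem.Set String)) (w c : String) :
    c ∈ (cks.foldl pvIndexCat d).getD w PySem.Set.empty ↔
      c ∈ d.getD w PySem.Set.empty ∨ ∃ p ∈ cks, c = p.1 ∧ w ∈ p.2 := by
  induction cks generalizing d with
  | nil => simp
  | cons p rest ih =>
    simp only [List.foldl_cons, ih, pvIndexCat, mem_getD_addAll, List.mem_cons]
    aesop

-- membership in a union-fold
theorem mem_foldl_union (l : List String) (g : String → PySem.Set String)
    (s : PySem.Set String) (c : String) :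
    c ∈ l.foldl (fun s w => PySem.Set.union s (g w)) s ↔ c ∈ s ∨ ∃ w ∈ l, c ∈ g w := by
  induction l generalizing s with
  | nil => simp
  | cons w rest ih =>
    simp only [List.foldl_cons, ih, PySem.Set.mem_union, List.mem_cons]
    aesop

-- for an entry of a duplicate-free dict, B's word_hits test ↔ A's intersection test
theorem hits_iff_inter (ql : String) (cks : List (String × List String))
    (hnd : (cks.map Prod.fst).Nodup) (p : String × List String) (hp : p ∈ cks) :
    ((PySem.Str.split₀ ql).foldl
        (fun s w => PySem.Set.union s ((cks.foldl pvIndexCat PySem.Dict.empty).getD w PySem.Set.empty))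
        PySem.Set.empty).contains p.1 = true ↔
      PySem.Set.inter (PySem.Set.ofList (PySem.Str.split₀ ql)) p.2 ≠ [] := by
  rw [PySem.Set.contains_iff, mem_foldl_union,
    ← List.isEmpty_eq_false_iff, List.isEmpty_eq_false_iff_exists_mem]
  constructor
  · rintro (h | ⟨w, hw, hmem⟩)
    · simp [PySem.Set.empty] at h
    · rcases (mem_getD_index_gen cks PySem.Dict.empty w p.1).1 hmem with h | ⟨q, hq, hq1, hq2⟩
      · simp [PySem.Dict.empty, PySem.Dict.getD, PySem.Dict.get?, PySem.Set.empty] at h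
      · have : q = p := List.inj_on_of_nodup_map hnd hq hp hq1.symm
        subst this
        exact ⟨w, (PySem.Set.mem_inter _ _ _).2 ⟨(PySem.Set.mem_ofList _ _).2 hw, hq2⟩⟩
  · rintro ⟨w, hw⟩
    rcases (PySem.Set.mem_inter _ _ _).1 hw with ⟨hw1, hw2⟩
    exact Or.inr ⟨w, (PySem.Set.mem_ofList _ _).1 hw1,
      (mem_getD_index_gen cks PySem.Dict.empty w p.1).2 (Or.inr ⟨p, hp, rfl, hw2⟩)⟩

-- A's break-loop is B's any
theorem pvASubLoop_eq_any (ql : String) (kws : List String) :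
    pvASubLoop ql kws = kws.any (pvSubMatch ql) := by
  induction kws with
  | nil => rfl
  | cons k rest ih => simp [pvASubLoop, pvSubMatch, ih]

-- ===== VERDICT (by name: the statement is the Claim_ definition above) =====
theorem detect_categories_spec : Claim_equal_detect_categories := by
  intro query cks _ hpre
  unfold Spec_detect_categories detect_categories detect_categories_alt
  by_cases hnil : cks = []
  · simp [hnil]
  · simp only [if_neg hnil]
    refine PySem.List.foldl_congr_mem cks _ _ [] ?_
    intro acc p hp
    have hiff := hits_iff_inter (PySem.Str.lower query) cks hpre p hp
    rw [pvASubLoop_eq_any]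
    by_cases hsub : p.2.any (pvSubMatch (PySem.Str.lower query)) = true <;>
      by_cases hint : PySem.Set.inter (PySem.Set.ofList (PySem.Str.split₀ (PySem.Str.lower query))) p.2 ≠ [] <;>
      simp_all
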